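-- pv_equiv track=rewrite | github.com/ronaque/Algorithms | utils/conversions.py | string_2_int_32
-- ===== SOURCE A (Python) =====
-- def string_2_int_32(input_string):
--     """
--     Converts a string to a 32 bit integer.
--     Parameters
--     ----------
--     input_string: The string to be converted.
--
--     Returns
--     -------
--     An integer.
--     """
--     result = 0
--     for c in input_string:
--         int_c = ord(c)
--         result = (result << 8) + int_c
--
--     if result.bit_length() > 32:
--         raise RuntimeError("The input string is too long to be converted to a 32 bits integer")
--     return result
-- ===== SOURCE B (Python) =====
-- def string_2_int_32(input_string):
--     n = len(input_string)
--     result = sum(ord(c) << (8 * (n - 1 - i)) for i, c in enumerate(input_string))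
--     if result.bit_length() > 32:
--         raise RuntimeError("The input string is too long to be converted to a 32 bits integer")
--     return result
-- ===== Notes on version B (the rewrite author's own statement) =====
-- stated objective: alternative
-- what changed: Replaces the running left-shift accumulator with a single positional weighted sum: each character's ord is shifted independently by 8*(n-1-i) using the length computed up front, instead of carrying a mutated accumulator through the loop; the trailing 32-bit guard is identical.
import Mathlib
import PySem

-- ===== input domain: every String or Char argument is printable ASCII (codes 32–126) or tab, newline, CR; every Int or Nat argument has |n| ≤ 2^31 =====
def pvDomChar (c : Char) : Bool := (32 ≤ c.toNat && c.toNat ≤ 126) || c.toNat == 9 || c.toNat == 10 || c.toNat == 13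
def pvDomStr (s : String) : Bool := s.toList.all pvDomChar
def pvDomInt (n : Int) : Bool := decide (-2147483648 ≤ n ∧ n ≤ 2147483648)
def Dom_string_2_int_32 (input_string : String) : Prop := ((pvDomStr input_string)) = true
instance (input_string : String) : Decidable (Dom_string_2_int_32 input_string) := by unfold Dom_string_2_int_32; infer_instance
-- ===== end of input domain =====

-- B replaces A's running left-shift accumulator by an independent positional weighted sum
-- (length computed up front); return-value equivalence, same cost ("alternative").

-- ===== PORT A =====
-- the trailing `raise` (result.bit_length() > 32) is excluded by Pre_; the returned value is the fold
def string_2_int_32 (input_string : String) : Int :=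
  input_string.toList.foldl (fun result c => result * 256 + (c.toNat : Int)) 0

-- ===== PORT B =====
-- B's Python keeps the identical trailing guard; it is likewise excluded by Pre_
def string_2_int_32_alt (input_string : String) : Int :=
  let n := input_string.toList.length
  (input_string.toList.zipIdx.map
    (fun p => (p.1.toNat : Int) * 2 ^ (8 * (n - 1 - p.2)))).sum

-- ===== PRECONDITION & SPEC =====
-- Pre_ excludes exactly the strings whose big-endian byte value needs more than 32 bits,
-- on which A raises RuntimeError (and B raises the identical RuntimeError); it excludes no
-- input on which A returns a value.
def Pre_string_2_int_32 (input_string : String) : Prop :=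
  (input_string.toList.reverse.zipIdx.map (fun p => (p.1.toNat : Int) * 256 ^ p.2)).sum < 2 ^ 32
instance (input_string : String) : Decidable (Pre_string_2_int_32 input_string) := by
  unfold Pre_string_2_int_32; infer_instance
def pvWitness_string_2_int_32 : String := "Ab\t!"
def Spec_string_2_int_32 (input_string : String) (out : Int) : Prop := out = string_2_int_32_alt input_string
instance (input_string : String) (out : Int) : Decidable (Spec_string_2_int_32 input_string out) := by unfold Spec_string_2_int_32; infer_instance

-- ===== CLAIM (what is proved, stated in full; the proofs are below) =====
def Claim_equal_string_2_int_32 : Prop := ∀ (input_string : String), Dom_string_2_int_32 input_string → Pre_string_2_int_32 input_string → Spec_string_2_int_32 input_string (string_2_int_32 input_string)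

-- ===== LEMMAS AND PROOFS =====

theorem s2i_fold_eq_weightSum (cs : List Char) :
    ∀ (acc : Int) (k n : Nat), k + cs.length = n →
    cs.foldl (fun result c => result * 256 + (c.toNat : Int)) acc
      = acc * 2 ^ (8 * cs.length)
        + ((cs.zipIdx k).map (fun p => (p.1.toNat : Int) * 2 ^ (8 * (n - 1 - p.2)))).sum := by
  induction cs with
  | nil => intro acc k n _; simp
  | cons c cs ih =>
    intro acc k n hk
    have hk' : (k + 1) + cs.length = n := by simpa [Nat.add_comm, Nat.add_left_comm] using hk
    have hw : n - 1 - k = cs.length := by omega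
    simp only [List.foldl_cons, List.zipIdx_cons, List.map_cons, List.sum_cons, List.length_cons]
    rw [ih (acc * 256 + (c.toNat : Int)) (k + 1) n hk', hw]
    have h256 : (256 : Int) = 2 ^ 8 := by norm_num
    rw [h256]
    rw [show 8 * (cs.length + 1) = 8 + 8 * cs.length by ring, pow_add]
    ring

-- ===== VERDICT (by name: the statement is the Claim_ definition above) =====
theorem string_2_int_32_spec : Claim_equal_string_2_int_32 := by
  intro s _ _
  unfold Spec_string_2_int_32 string_2_int_32 string_2_int_32_alt
  rw [s2i_fold_eq_weightSum s.toList 0 0 s.toList.length (by simp)]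
  simp
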